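-- pv_equiv track=rewrite | github.com/jerrywan4/MineCity | stock-filters/structure.py | buildFloor
-- ===== SOURCE A (Python) =====
-- def buildFloor(floors,themap):
--     height = len(floors);
--     width = 0;
--     length = 0;
--     for y in range(height):
--         length = max(length,len(floors[y]));
--         for x in range(len(floors[y])):
--             width = max(width,len(floors[y][x]));
--
--     house = [];
--     for x in range(width):
--         house.append([]);
--         for z in range(length):
--             house[x].append([]);
--             for y in range(height):
--                 house[x][z].append([0,0]);
--     for y in range(height):
--         for x in range(len(floors[y])):
--             for z in range(len(floors[y][x])):
--                 char = floors[y][x][z];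
--                 if char in themap:
--                     house[z][x][y] = themap[char]
--     return house;
-- ===== SOURCE B (Python) =====
-- def buildFloor(floors, themap):
--     height = len(floors)
--     length = max((len(f) for f in floors), default=0)
--     width = max((len(row) for f in floors for row in f), default=0)
--
--     def cell(a, b, c):
--         if b < len(floors[c]) and a < len(floors[c][b]):
--             ch = floors[c][b][a]
--             if ch in themap:
--                 return themap[ch]
--         return [0, 0]
--
--     return [[[cell(a, b, c) for c in range(height)]
--              for b in range(length)]
--             for a in range(width)]
-- ===== Notes on version B (the rewrite author's own statement) =====
-- stated objective: alternative
-- what changed: A allocates a width*length*height array of [0,0] cells and then scatter-overwrites cells in a second triple loop over the floor maps; B computes each cell directly in one dense gather pass (a nested comprehension with a bounded lookup into the transposed floor maps), with the dimensions taken by max over flattened generators instead of A's interleaved running-max scan.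
import Mathlib
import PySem

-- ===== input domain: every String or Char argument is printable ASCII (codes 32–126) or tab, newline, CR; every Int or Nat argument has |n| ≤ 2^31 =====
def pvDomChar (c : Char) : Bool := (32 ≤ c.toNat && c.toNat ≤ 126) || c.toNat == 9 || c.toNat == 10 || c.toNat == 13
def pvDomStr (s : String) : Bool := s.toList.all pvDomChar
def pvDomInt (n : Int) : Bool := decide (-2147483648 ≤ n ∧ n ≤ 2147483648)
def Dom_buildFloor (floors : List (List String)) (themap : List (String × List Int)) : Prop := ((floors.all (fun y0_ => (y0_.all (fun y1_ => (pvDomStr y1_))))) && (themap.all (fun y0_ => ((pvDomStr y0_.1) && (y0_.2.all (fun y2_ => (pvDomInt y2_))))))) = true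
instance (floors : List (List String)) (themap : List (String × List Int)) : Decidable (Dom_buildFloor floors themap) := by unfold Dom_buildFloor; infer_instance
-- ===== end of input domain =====

-- B replaces A's allocate-then-scatter construction by a single dense gather pass
-- (each cell computed directly from the transposed floor maps); equal return value proved.


-- ===== PORT A =====
-- literal transliteration: dimension scan, allocate width×length×height of [0,0],
-- then the scatter triple loop house[z][x][y] = themap[char]; len(str) is s.toList.length,
-- 'char in themap' + 'themap[char]' is a first-match find? on the association list,
-- s[z] (a 1-char string) compared to a key k as k.toList == [s[z]].
def buildFloor (floors : List (List String)) (themap : List (String × List Int)) : List (List (List (List Int))) :=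
  let height : Int := floors.length
  let dims :=
    (PySem.List.pyRange 0 height).foldl (fun (wl : Int × Int) y =>
      let row := PySem.List.pyGetD floors y []
      let length := max wl.2 (row.length : Int)
      let width := (PySem.List.pyRange 0 (row.length : Int)).foldl (fun w x =>
        max w (((PySem.List.pyGetD row x "").toList.length : Int))) wl.1
      (width, length)) (0, 0)
  let house :=
    (PySem.List.pyRange 0 dims.1).foldl (fun h _ =>
      h ++ [(PySem.List.pyRange 0 dims.2).foldl (fun p _ =>
        p ++ [(PySem.List.pyRange 0 height).foldl (fun r _ =>
          r ++ [([0, 0] : List Int)]) []]) []]) []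
  (PySem.List.pyRange 0 height).foldl (fun h y =>
    let row := PySem.List.pyGetD floors y []
    (PySem.List.pyRange 0 (row.length : Int)).foldl (fun h x =>
      let s := (PySem.List.pyGetD row x "").toList
      (PySem.List.pyRange 0 (s.length : Int)).foldl (fun h z =>
        match themap.find? (fun p => p.1.toList == [PySem.List.pyGetD s z ' ']) with
        | some p =>
            PySem.List.pySetD h z (PySem.List.pySetD (PySem.List.pyGetD h z [])
              x (PySem.List.pySetD (PySem.List.pyGetD (PySem.List.pyGetD h z []) x []) y p.2))
        | none => h) h) h) house

-- ===== PORT B =====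
-- Source B's cell(a, b, c): bounded lookup into the transposed floor maps.
def cell_b (floors : List (List String)) (themap : List (String × List Int)) (a b c : Nat) : List Int :=
  let row := floors.getD c []
  if b < row.length ∧ a < ((row.getD b "").toList).length then
    match themap.find? (fun p => p.1.toList == [((row.getD b "").toList).getD a ' ']) with
    | some p => p.2
    | none => [0, 0]
  else [0, 0]

-- Source B: dims by max(generator, default=0) (= PySem.List.maxD over the flattened lengths),
-- then one dense nested comprehension.
def buildFloor_alt (floors : List (List String)) (themap : List (String × List Int)) : List (List (List (List Int))) :=
  let height := floors.length
  let length := PySem.List.maxD (floors.map List.length) id 0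
  let width := PySem.List.maxD (floors.flatMap (fun f => f.map (fun r => r.toList.length))) id 0
  (List.range width).map (fun a =>
    (List.range length).map (fun b =>
      (List.range height).map (fun c => cell_b floors themap a b c)))

-- ===== PRECONDITION & SPEC =====
def Spec_buildFloor (floors : List (List String)) (themap : List (String × List Int)) (out : List (List (List (List Int)))) : Prop := out = buildFloor_alt floors themap
instance (floors : List (List String)) (themap : List (String × List Int)) (out : List (List (List (List Int)))) : Decidable (Spec_buildFloor floors themap out) := by unfold Spec_buildFloor; infer_instance

-- ===== CLAIM (what is proved, stated in full; the proofs are below) =====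
def Claim_equal_buildFloor : Prop := ∀ (floors : List (List String)) (themap : List (String × List Int)), Dom_buildFloor floors themap → Spec_buildFloor floors themap (buildFloor floors themap)

-- ===== LEMMAS AND PROOFS =====

-- the value written (if any) for write-target (z, x, y) = (t.1, t.2.1, t.2.2)
def look (floors : List (List String)) (themap : List (String × List Int)) (t : Nat × Nat × Nat) : Option (List Int) :=
  (themap.find? (fun p => p.1.toList == [((floors.getD t.2.2 []).getD t.2.1 "").toList.getD t.1 ' '])).map (·.2)

def setc (h : List (List (List (List Int)))) (z x y : Nat) (v : List Int) : List (List (List (List Int))) :=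
  h.set z ((h.getD z []).set x (((h.getD z []).getD x []).set y v))

def stepA (floors : List (List String)) (themap : List (String × List Int))
    (h : List (List (List (List Int)))) (t : Nat × Nat × Nat) : List (List (List (List Int))) :=
  match themap.find? (fun p => p.1.toList == [((floors.getD t.2.2 []).getD t.2.1 "").toList.getD t.1 ' ']) with
  | some p => setc h t.1 t.2.1 t.2.2 p.2
  | none => h

def get3 (h : List (List (List (List Int)))) (a b c : Nat) : List Int :=
  ((h.getD a []).getD b []).getD c []

def Shp (h : List (List (List (List Int)))) (W L H : Nat) : Prop :=
  h.length = W ∧ ∀ a < W, (h.getD a []).length = L ∧ ∀ b < L, ((h.getD a []).getD b []).length = H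

def Ltr (floors : List (List String)) : List (Nat × Nat × Nat) :=
  (List.range floors.length).flatMap (fun y =>
    (List.range (floors.getD y []).length).flatMap (fun x =>
      (List.range ((floors.getD y []).getD x "").toList.length).map (fun z => (z, x, y))))

def wB (floors : List (List String)) : Nat :=
  (floors.flatMap (fun f => f.map (fun r => r.toList.length))).foldl max 0

def lB (floors : List (List String)) : Nat :=
  (floors.map List.length).foldl max 0

lemma max?_eq_foldl (l : List Nat) : ∀ (m : Nat), PySem.List.max? (m :: l) id = some (l.foldl max m) := by
  induction l with
  | nil => intro m; rfl
  | cons x t ih =>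
    intro m
    by_cases h : m < x
    · have h1 : PySem.List.max? (m :: x :: t) id = PySem.List.max? (x :: t) id := by
        simp [PySem.List.max?, h]
      rw [h1, ih x, List.foldl_cons, show max m x = x by omega]
    · have h1 : PySem.List.max? (m :: x :: t) id = PySem.List.max? (m :: t) id := by
        simp [PySem.List.max?, h]
      rw [h1, ih m, List.foldl_cons, show max m x = m by omega]

lemma maxD_eq_foldl (l : List Nat) : PySem.List.maxD l id 0 = l.foldl max 0 := by
  cases l with
  | nil => rfl
  | cons x t => simp [PySem.List.maxD, max?_eq_foldl]

lemma pySetD_natCast' {α : Type} (xs : List α) (n : Nat) (v : α) :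
    PySem.List.pySetD xs (n : Int) v = xs.set n v := by
  by_cases h : n < xs.length
  · simp [PySem.List.pySetD, PySem.List.pySet?_natCast xs n v h]
  · have h0 : PySem.List.pySet? xs (n : Int) v = none :=
      (PySem.List.pySet?_eq_none_iff xs (n : Int) v).mpr (by simp [PySem.Raise.InRange]; omega)
    simp [PySem.List.pySetD, h0, List.set_eq_of_length_le (by omega : xs.length ≤ n)]

lemma foldl_pyRange_natCast {β : Type} (n : Nat) (f : β → Int → β) (init : β) :
    (PySem.List.pyRange 0 (n : Int)).foldl f init = (List.range n).foldl (fun acc (k : Nat) => f acc (k : Int)) init := by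
  rw [PySem.List.pyRange_zero_natCast, List.foldl_map]

lemma foldl_max_int_cast (rs : List String) (w : Nat) :
    rs.foldl (fun w r => max w ((r.toList.length : Int))) (w : Int)
      = ((rs.foldl (fun w r => max w r.toList.length) w : Nat) : Int) := by
  induction rs generalizing w with
  | nil => rfl
  | cons r t ih => simp only [List.foldl_cons, ← Nat.cast_max, ih]

lemma dims_eq (floors : List (List String)) (w l : Nat) :
    floors.foldl (fun (wl : Int × Int) row =>
        ((row.foldl (fun w r => max w ((r.toList.length : Int))) wl.1), max wl.2 (row.length : Int)))
      ((w : Int), (l : Int))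
    = ((((floors.flatMap (fun f => f.map (fun r => r.toList.length))).foldl max w : Nat) : Int),
       (((floors.map List.length).foldl max l : Nat) : Int)) := by
  induction floors generalizing w l with
  | nil => rfl
  | cons row t ih =>
    simp only [List.foldl_cons, List.flatMap_cons, List.map_cons, List.foldl_append,
      List.foldl_map, foldl_max_int_cast, ← Nat.cast_max, ih]

lemma initA (w l hh : Nat) :
    (PySem.List.pyRange 0 (w : Int)).foldl (fun h _ =>
      h ++ [(PySem.List.pyRange 0 (l : Int)).foldl (fun p _ =>
        p ++ [(PySem.List.pyRange 0 (hh : Int)).foldl (fun r _ =>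
          r ++ [([0, 0] : List Int)]) []]) []]) []
    = List.replicate w (List.replicate l (List.replicate hh ([0, 0] : List Int))) := by
  simp only [PySem.List.foldl_append_singleton_eq_map, List.nil_append]
  simp [List.map_const', PySem.List.length_pyRange_one]

lemma getD_set' {α : Type} (l : List α) (n m : Nat) (v d : α) :
    (l.set n v).getD m d = if n = m ∧ n < l.length then v else l.getD m d := by
  rcases Decidable.em (n = m) with h | h
  · subst h
    rcases Decidable.em (n < l.length) with h2 | h2
    · simp [List.getD_eq_getElem?_getD, h2]
    · simp [h2, List.set_eq_of_length_le (le_of_not_gt h2)]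
  · simp [List.getD_eq_getElem?_getD, List.getElem?_set_ne h, h]

lemma get3_setc_self (h : List (List (List (List Int)))) (W L H : Nat) (z x y : Nat) (v : List Int)
    (hs : Shp h W L H) (hz : z < W) (hx : x < L) (hy : y < H) :
    get3 (setc h z x y v) z x y = v := by
  obtain ⟨hL, hrest⟩ := hs
  have hz' : z < h.length := by omega
  have hx' : x < (h.getD z []).length := by rw [(hrest z hz).1]; exact hx
  have hy' : y < ((h.getD z []).getD x []).length := by rw [(hrest z hz).2 x hx]; exact hy
  rw [get3, setc, getD_set', if_pos ⟨rfl, hz'⟩, getD_set', if_pos ⟨rfl, hx'⟩,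
    getD_set', if_pos ⟨rfl, hy'⟩]

lemma get3_setc_other (h : List (List (List (List Int)))) (z x y a b c : Nat) (v : List Int)
    (hne : ¬ (a = z ∧ b = x ∧ c = y)) :
    get3 (setc h z x y v) a b c = get3 h a b c := by
  rw [get3, setc, getD_set']
  split_ifs with h1
  · obtain ⟨rfl, -⟩ := h1
    rw [getD_set']
    split_ifs with h2
    · obtain ⟨rfl, -⟩ := h2
      rw [getD_set']
      rw [if_neg (by rintro ⟨rfl, -⟩; exact hne ⟨rfl, rfl, rfl⟩)]
      rfl
    · rfl
  · rfl

lemma Shp_setc (h : List (List (List (List Int)))) (W L H : Nat) (z x y : Nat) (v : List Int)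
    (hs : Shp h W L H) : Shp (setc h z x y v) W L H := by
  obtain ⟨hL, hrest⟩ := hs
  refine ⟨by simp [setc, hL], fun a ha => ⟨?_, fun b hb => ?_⟩⟩
  · rw [setc, getD_set']
    split_ifs with h1
    · obtain ⟨rfl, -⟩ := h1
      simpa [List.length_set, List.getD_eq_getElem?_getD] using (hrest z ha).1
    · exact (hrest a ha).1
  · rw [setc, getD_set']
    split_ifs with h1
    · obtain ⟨rfl, -⟩ := h1
      rw [getD_set']
      split_ifs with h2
      · obtain ⟨rfl, -⟩ := h2
        simpa [List.length_set, List.getD_eq_getElem?_getD] using (hrest z ha).2 x hb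
      · exact (hrest z ha).2 b hb
    · exact (hrest a ha).2 b hb

lemma Shp_stepA (floors : List (List String)) (themap : List (String × List Int))
    (h : List (List (List (List Int)))) (W L H : Nat) (t : Nat × Nat × Nat)
    (hs : Shp h W L H) : Shp (stepA floors themap h t) W L H := by
  unfold stepA; split
  · exact Shp_setc _ _ _ _ _ _ _ _ hs
  · exact hs

lemma stepA_eq_look (floors : List (List String)) (themap : List (String × List Int))
    (h : List (List (List (List Int)))) (t : Nat × Nat × Nat) :
    stepA floors themap h t
      = match look floors themap t with
        | some v => setc h t.1 t.2.1 t.2.2 v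
        | none => h := by
  unfold stepA look
  cases themap.find? (fun p => p.1.toList == [((floors.getD t.2.2 []).getD t.2.1 "").toList.getD t.1 ' ']) <;> rfl

lemma scatter_get3 (floors : List (List String)) (themap : List (String × List Int)) (W L H : Nat) :
    ∀ (Lt : List (Nat × Nat × Nat)) (h : List (List (List (List Int)))),
      Shp h W L H → (∀ t ∈ Lt, t.1 < W ∧ t.2.1 < L ∧ t.2.2 < H) →
      Shp (Lt.foldl (stepA floors themap) h) W L H ∧
      ∀ a b c, a < W → b < L → c < H →
        get3 (Lt.foldl (stepA floors themap) h) a b c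
          = match (if (a, b, c) ∈ Lt then look floors themap (a, b, c) else none) with
            | some v => v
            | none => get3 h a b c := by
  intro Lt
  induction Lt with
  | nil =>
    intro h hs _
    exact ⟨hs, by intro a b c _ _ _; simp⟩
  | cons t rest ih =>
    obtain ⟨z, x, y⟩ := t
    intro h hs hbnd
    have hbt := hbnd (z, x, y) (List.mem_cons_self)
    have hs' : Shp (stepA floors themap h (z, x, y)) W L H := Shp_stepA _ _ _ _ _ _ _ hs
    obtain ⟨ihShp, ihGet⟩ := ih (stepA floors themap h (z, x, y)) hs'
      (fun u hu => hbnd u (List.mem_cons_of_mem _ hu))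
    refine ⟨by simpa [List.foldl_cons] using ihShp, ?_⟩
    intro a b c ha hb hc
    rw [List.foldl_cons, ihGet a b c ha hb hc]
    by_cases hmem : (a, b, c) ∈ rest
    · simp only [hmem, if_true, List.mem_cons, or_true]
      cases hlook : look floors themap (a, b, c) with
      | some v => rfl
      | none =>
        simp only
        rw [stepA_eq_look]
        by_cases ht : (z, x, y) = ((a : Nat), (b : Nat), (c : Nat))
        · obtain ⟨rfl, rfl, rfl⟩ : z = a ∧ x = b ∧ y = c := by simpa [Prod.ext_iff] using ht
          rw [hlook]
        · cases hlt : look floors themap (z, x, y) with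
          | none => rfl
          | some w =>
            exact get3_setc_other h z x y a b c w
              (by rintro ⟨rfl, rfl, rfl⟩; exact ht rfl)
    · by_cases ht : (z, x, y) = ((a : Nat), (b : Nat), (c : Nat))
      · obtain ⟨rfl, rfl, rfl⟩ : z = a ∧ x = b ∧ y = c := by simpa [Prod.ext_iff] using ht
        simp only [hmem, if_false, List.mem_cons, true_or, if_true]
        rw [stepA_eq_look]
        cases hlook : look floors themap (z, x, y) with
        | none => rfl
        | some v => exact get3_setc_self h W L H z x y v hs ha hb hc
      · have hcond : ¬ ((a, b, c) ∈ (z, x, y) :: rest) := by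
          simp only [List.mem_cons]
          rintro (h1 | h1)
          · exact ht h1.symm
          · exact hmem h1
        rw [if_neg hcond, if_neg hmem]
        rw [stepA_eq_look]
        cases hlt : look floors themap (z, x, y) with
        | none => rfl
        | some w =>
          exact get3_setc_other h z x y a b c w (by rintro ⟨rfl, rfl, rfl⟩; exact ht rfl)

lemma getD_mem' {α : Type} (l : List α) (n : Nat) (d : α) (h : n < l.length) : l.getD n d ∈ l := by
  rw [List.getD_eq_getElem l d h]
  exact List.getElem_mem h

lemma mem_Ltr (floors : List (List String)) (a b c : Nat) :
    (a, b, c) ∈ Ltr floors ↔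
      c < floors.length ∧ b < (floors.getD c []).length ∧
        a < ((floors.getD c []).getD b "").toList.length := by
  simp only [Ltr, List.mem_flatMap, List.mem_map, List.mem_range, Prod.mk.injEq]
  constructor
  · rintro ⟨y, hy, x, hx, z, hz, rfl, rfl, rfl⟩
    exact ⟨hy, hx, hz⟩
  · rintro ⟨hc, hb, ha⟩
    exact ⟨c, hc, b, hb, a, ha, rfl, rfl, rfl⟩

lemma bounds_Ltr (floors : List (List String)) :
    ∀ t ∈ Ltr floors, t.1 < wB floors ∧ t.2.1 < lB floors ∧ t.2.2 < floors.length := by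
  rintro ⟨z, x, y⟩ ht
  obtain ⟨hy, hx, hz⟩ := (mem_Ltr floors z x y).mp ht
  have hrow : floors.getD y [] ∈ floors := getD_mem' _ _ _ hy
  refine ⟨?_, ?_, hy⟩
  · show z < wB floors
    have hmem : ((floors.getD y []).getD x "").toList.length
        ∈ floors.flatMap (fun f => f.map (fun r => r.toList.length)) :=
      List.mem_flatMap.mpr ⟨floors.getD y [], hrow,
        List.mem_map.mpr ⟨(floors.getD y []).getD x "", getD_mem' _ _ _ hx, rfl⟩⟩
    have hle := (PySem.List.le_foldl_max (floors.flatMap (fun f => f.map (fun r => r.toList.length))) 0).2 _ hmem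
    unfold wB
    omega
  · show x < lB floors
    have hmem : (floors.getD y []).length ∈ floors.map List.length :=
      List.mem_map.mpr ⟨floors.getD y [], hrow, rfl⟩
    have hle := (PySem.List.le_foldl_max (floors.map List.length) 0).2 _ hmem
    unfold lB
    omega

lemma cell_b_eq (floors : List (List String)) (themap : List (String × List Int)) (a b c : Nat)
    (hc : c < floors.length) :
    cell_b floors themap a b c
      = match (if (a, b, c) ∈ Ltr floors then look floors themap (a, b, c) else none) with
        | some v => v
        | none => [0, 0] := by
  rw [cell_b]
  by_cases hcond : b < (floors.getD c []).length ∧ a < ((floors.getD c []).getD b "").toList.length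
  · rw [if_pos hcond, if_pos ((mem_Ltr floors a b c).mpr ⟨hc, hcond.1, hcond.2⟩)]
    rw [look]
    cases themap.find? (fun p => p.1.toList == [((floors.getD c []).getD b "").toList.getD a ' ']) <;> rfl
  · rw [if_neg hcond, if_neg (fun hm => hcond ⟨((mem_Ltr floors a b c).mp hm).2.1, ((mem_Ltr floors a b c).mp hm).2.2⟩)]

lemma eq_map_range_of_getD {α : Type} (h : List α) (n : Nat) (d : α) (g : Nat → α)
    (hl : h.length = n) (hg : ∀ i < n, h.getD i d = g i) : h = (List.range n).map g := by
  apply List.ext_getElem (by simp [hl])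
  intro i h1 h2
  have hi : i < n := by simpa [hl] using h1
  have h3 := hg i hi
  rw [List.getD_eq_getElem?_getD, List.getElem?_eq_getElem h1] at h3
  simpa using h3

lemma nestedA_eq_foldl_Ltr (floors : List (List String)) (themap : List (String × List Int))
    (h0 : List (List (List (List Int)))) :
    (List.range floors.length).foldl (fun h y =>
      (List.range (floors.getD y []).length).foldl (fun h x =>
        (List.range ((floors.getD y []).getD x "").toList.length).foldl (fun h z =>
          match themap.find? (fun p => p.1.toList == [((floors.getD y []).getD x "").toList.getD z ' ']) with
          | some p => h.set z ((h.getD z []).set x (((h.getD z []).getD x []).set y p.2))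
          | none => h) h) h) h0
    = (Ltr floors).foldl (stepA floors themap) h0 := by
  simp [Ltr, List.foldl_flatMap, List.foldl_map, stepA, setc]

lemma dimsA_eq (floors : List (List String)) :
    floors.foldl (fun (wl : Int × Int) row =>
      ((PySem.List.pyRange 0 (row.length : Int)).foldl
        (fun w x => max w ((PySem.List.pyGetD row x "").toList.length : Int)) wl.1,
       max wl.2 (row.length : Int))) ((0 : Int), (0 : Int))
    = ((wB floors : Int), (lB floors : Int)) := by
  rw [PySem.List.foldl_congr_mem floors _
    (fun (wl : Int × Int) row =>
      (row.foldl (fun w r => max w ((r.toList.length : Int))) wl.1, max wl.2 (row.length : Int)))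
    ((0 : Int), (0 : Int))
    (by
      intro acc row _
      rw [PySem.List.foldl_pyRange_zero_pyGetD' row "" (fun w r => max w ((r.toList.length : Int))) acc.1])]
  have h := dims_eq floors 0 0
  rw [show ((0:Int),(0:Int)) = (((0:Nat):Int),((0:Nat):Int)) by norm_num] at *
  rw [h]
  rfl

lemma buildFloor_eq (floors : List (List String)) (themap : List (String × List Int)) :
    buildFloor floors themap
      = (Ltr floors).foldl (stepA floors themap)
          (List.replicate (wB floors) (List.replicate (lB floors)
            (List.replicate floors.length ([0, 0] : List Int)))) := by
  simp only [buildFloor]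
  rw [PySem.List.foldl_pyRange_zero_pyGetD' floors []
    (fun (wl : Int × Int) row =>
      ((PySem.List.pyRange 0 (row.length : Int)).foldl
        (fun w x => max w ((PySem.List.pyGetD row x "").toList.length : Int)) wl.1,
       max wl.2 (row.length : Int)))
    ((0 : Int), (0 : Int))]
  rw [dimsA_eq]
  simp only []
  rw [initA (wB floors) (lB floors) floors.length]
  simp only [foldl_pyRange_natCast, PySem.List.pyGetD_natCast, pySetD_natCast']
  rw [nestedA_eq_foldl_Ltr]

lemma Shp_init (w l hh : Nat) :
    Shp (List.replicate w (List.replicate l (List.replicate hh ([0, 0] : List Int)))) w l hh := by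
  refine ⟨by simp, fun a ha => ⟨?_, fun b hb => ?_⟩⟩
  · simp [List.getD_eq_getElem?_getD, ha]
  · simp [List.getD_eq_getElem?_getD, ha, hb]

lemma get3_init (w l hh a b c : Nat) (ha : a < w) (hb : b < l) (hc : c < hh) :
    get3 (List.replicate w (List.replicate l (List.replicate hh ([0, 0] : List Int)))) a b c = [0, 0] := by
  simp [get3, List.getD_eq_getElem?_getD, ha, hb, hc]

lemma alt_eq (floors : List (List String)) (themap : List (String × List Int)) :
    buildFloor_alt floors themap
      = (List.range (wB floors)).map (fun a =>
          (List.range (lB floors)).map (fun b =>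
            (List.range floors.length).map (fun c => cell_b floors themap a b c))) := by
  simp only [buildFloor_alt, maxD_eq_foldl]
  rfl

-- ===== VERDICT (by name: the statement is the Claim_ definition above) =====
theorem buildFloor_spec : Claim_equal_buildFloor := by
  intro floors themap _
  unfold Spec_buildFloor
  rw [buildFloor_eq, alt_eq]
  obtain ⟨hshp, hget⟩ := scatter_get3 floors themap (wB floors) (lB floors) floors.length
    (Ltr floors) _ (Shp_init _ _ _) (bounds_Ltr floors)
  apply eq_map_range_of_getD _ _ ([] : List (List (List Int))) _ hshp.1
  intro a ha
  apply eq_map_range_of_getD _ _ ([] : List (List Int)) _ (hshp.2 a ha).1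
  intro b hb
  apply eq_map_range_of_getD _ _ ([] : List Int) _ ((hshp.2 a ha).2 b hb)
  intro c hc
  show get3 _ a b c = _
  rw [hget a b c ha hb hc, cell_b_eq floors themap a b c hc]
  cases hif : (if (a, b, c) ∈ Ltr floors then look floors themap (a, b, c) else none) with
  | some v => rfl
  | none => exact get3_init _ _ _ _ _ _ ha hb hc
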